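-- pv_equiv track=rewrite | github.com/Nayan-das08/Codes | ADA/open-ended/mcm.py | get_mat
-- ===== SOURCE A (Python) =====
-- def get_mat(n):
-- 	m = []
-- 	for i in range(n):
-- 		row = [i for i in range(n)]
-- 		m.append(row)
-- 	for i in range(n):
-- 		m[i][0] = m[0][i] = i
--
-- 	return m
-- ===== SOURCE B (Python) =====
-- def get_mat(n):
--     # closed form: cell (i, j) is i in column 0 and j elsewhere
--     return [[i if j == 0 else j for j in range(n)] for i in range(n)]
-- ===== Notes on version B (the rewrite author's own statement) =====
-- stated objective: simpler
-- what changed: B computes each entry directly from the closed form (i if j==0 else j) in one comprehension, replacing A's build-rows-then-patch-first-row-and-column two-loop structure.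
import Mathlib
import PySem

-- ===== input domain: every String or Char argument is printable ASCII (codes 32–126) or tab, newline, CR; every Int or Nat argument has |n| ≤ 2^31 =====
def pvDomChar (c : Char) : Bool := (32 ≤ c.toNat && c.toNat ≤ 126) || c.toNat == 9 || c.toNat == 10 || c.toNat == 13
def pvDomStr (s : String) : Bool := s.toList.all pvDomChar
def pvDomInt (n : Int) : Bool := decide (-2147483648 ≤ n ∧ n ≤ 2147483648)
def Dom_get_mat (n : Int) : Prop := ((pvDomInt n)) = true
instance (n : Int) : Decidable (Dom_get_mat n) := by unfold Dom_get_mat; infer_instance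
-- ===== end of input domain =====

-- B replaces A's build-rows-then-patch-first-row-and-column loops by the closed form
-- 'i if j == 0 else j' computed in a single comprehension (simpler; same O(n^2) cost).

-- ===== PORT A =====
-- m[i] / m[i][v] assignments use pySetD/pyGetD: all indices here come from range(n), so they are
-- in range and these total forms are exact.
def get_mat (n : Int) : List (List Int) :=
  -- m = []; for i in range(n): row = [i for i in range(n)]; m.append(row)
  let m : List (List Int) :=
    (PySem.List.pyRange 0 n 1).foldl
      (fun m _i => m ++ [(PySem.List.pyRange 0 n 1).map (fun i => i)]) []
  -- for i in range(n): m[i][0] = m[0][i] = i   (chained assignment: m[i][0] first, then m[0][i])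
  (PySem.List.pyRange 0 n 1).foldl
    (fun m i =>
      let m := PySem.List.pySetD m i (PySem.List.pySetD (PySem.List.pyGetD m i []) 0 i)
      PySem.List.pySetD m 0 (PySem.List.pySetD (PySem.List.pyGetD m 0 []) i i)) m

-- ===== PORT B =====
def get_mat_alt (n : Int) : List (List Int) :=
  (PySem.List.pyRange 0 n 1).map (fun i =>
    (PySem.List.pyRange 0 n 1).map (fun j => if j = 0 then i else j))

-- ===== PRECONDITION & SPEC =====
def Spec_get_mat (n : Int) (out : List (List Int)) : Prop := out = get_mat_alt n
instance (n : Int) (out : List (List Int)) : Decidable (Spec_get_mat n out) := by unfold Spec_get_mat; infer_instance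

-- ===== CLAIM (what is proved, stated in full; the proofs are below) =====
def Claim_equal_get_mat : Prop := ∀ (n : Int), Dom_get_mat n → Spec_get_mat n (get_mat n)

-- ===== LEMMAS AND PROOFS =====

-- the state of A's second loop after the iterations i = 0, …, t-1 have run
def pvRow (n t i : Int) : List Int :=
  (PySem.List.pyRange 0 n 1).map (fun j => if j = 0 ∧ i < t then i else j)

def pvSM (n t : Int) : List (List Int) :=
  (PySem.List.pyRange 0 n 1).map (fun i => pvRow n t i)

def pvStep (m : List (List Int)) (i : Int) : List (List Int) :=
  let m := PySem.List.pySetD m i (PySem.List.pySetD (PySem.List.pyGetD m i []) 0 i)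
  PySem.List.pySetD m 0 (PySem.List.pySetD (PySem.List.pyGetD m 0 []) i i)

theorem pvRow_congr (n t t' i : Int) (h : i < t ↔ i < t') : pvRow n t i = pvRow n t' i := by
  unfold pvRow
  apply List.map_congr_left
  intro j _
  simp only [h]

theorem pvRow_self (n t : Int) : pvRow n t t = PySem.List.pyRange 0 n 1 := by
  unfold pvRow
  simp

theorem pvRow_zero_eq (n t : Int) : pvRow n t 0 = PySem.List.pyRange 0 n 1 := by
  unfold pvRow
  have h : ∀ j ∈ PySem.List.pyRange 0 n 1,
      (if j = 0 ∧ (0:Int) < t then (0:Int) else j) = (fun (j : Int) => j) j := by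
    intro j _; split_ifs with hc
    · exact hc.1.symm
    · rfl
  rw [List.map_congr_left h, List.map_id']

-- setting R[0] := t produces the row of threshold t+1
theorem set_zero_row (n t : Int) (h : t < n) (h0 : 0 ≤ t) :
    (PySem.List.pyRange 0 n 1).set 0 t = pvRow n (t + 1) t := by
  have hn : (0:Int) < n := lt_of_le_of_lt h0 h
  rw [PySem.List.pyRange_one_cons hn]
  unfold pvRow
  rw [PySem.List.pyRange_one_cons hn, List.set_cons_zero, List.map_cons]
  congr 1
  · simp
  · symm
    have h2 : ∀ j ∈ PySem.List.pyRange (0+1) n 1,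
        (if j = 0 ∧ t < t + 1 then t else j) = (fun (j : Int) => j) j := by
      intro j hj
      have := (PySem.List.mem_pyRange_one).mp hj
      split_ifs with hc
      · omega
      · rfl
    rw [List.map_congr_left h2, List.map_id']

-- setting R[t] := t is the identity (R already holds t there)
theorem set_self_range (n t : Int) (h0 : 0 ≤ t) (h : t < n) :
    (PySem.List.pyRange 0 n 1).set t.toNat t = PySem.List.pyRange 0 n 1 := by
  apply List.ext_getElem?
  intro k
  rw [List.getElem?_set]
  have hlen : t.toNat < (PySem.List.pyRange 0 n 1).length := by
    rw [PySem.List.length_pyRange_one]; omega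
  by_cases hk : t.toNat = k
  · rw [if_pos hk, if_pos hlen]
    subst hk
    rw [List.getElem?_eq_getElem hlen, PySem.List.getElem_pyRange_one]
    congr 1
    omega
  · rw [if_neg hk]

theorem pvStep_eq (n t : Int) (h0 : 0 ≤ t) (h : t < n) :
    pvStep (pvSM n t) t = pvSM n (t + 1) := by
  have hn : (0:Int) < n := lt_of_le_of_lt h0 h
  have hget : PySem.List.pyGetD (pvSM n t) t [] = pvRow n t t := by
    unfold pvSM
    exact PySem.List.pyGetD_map_pyRange_of_nonneg _ _ _ _ h0 h
  have hrow : PySem.List.pySetD (PySem.List.pyGetD (pvSM n t) t []) 0 t = pvRow n (t + 1) t := by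
    rw [hget, pvRow_self, PySem.List.pySetD_of_nonneg (h := le_rfl)]
    simpa using set_zero_row n t h h0
  have hm1 : PySem.List.pySetD (pvSM n t) t (PySem.List.pySetD (PySem.List.pyGetD (pvSM n t) t []) 0 t)
      = pvSM n (t + 1) := by
    rw [hrow, PySem.List.pySetD_of_nonneg (h := h0)]
    unfold pvSM
    apply List.ext_getElem?
    intro k
    rw [List.getElem?_set]
    by_cases hk : t.toNat = k
    · have hlen : t.toNat < ((PySem.List.pyRange 0 n 1).map (fun i => pvRow n t i)).length := by
        rw [List.length_map, PySem.List.length_pyRange_one]; omega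
      rw [if_pos hk, if_pos hlen]
      subst hk
      have hlen' : t.toNat < (PySem.List.pyRange 0 n 1).length := by
        rw [PySem.List.length_pyRange_one]; omega
      rw [List.getElem?_map, List.getElem?_eq_getElem hlen', PySem.List.getElem_pyRange_one]
      simp only [Option.map_some]
      congr 1
      have he : (0:Int) + (t.toNat : Int) = t := by omega
      rw [he]
    · rw [if_neg hk, List.getElem?_map, List.getElem?_map]
      rcases hkl : (PySem.List.pyRange 0 n 1)[k]? with _ | v
      · rfl
      · simp only [Option.map_some]
        congr 1
        have hv : v = (k : Int) := by
          have hk2 : k < (PySem.List.pyRange 0 n 1).length := (List.getElem?_eq_some_iff.mp hkl).1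
          have hg := List.getElem?_eq_getElem hk2
          rw [hg, PySem.List.getElem_pyRange_one] at hkl
          have := Option.some.inj hkl
          omega
        apply pvRow_congr
        subst hv
        constructor <;> intro <;> omega
  rw [show pvStep (pvSM n t) t
      = PySem.List.pySetD (PySem.List.pySetD (pvSM n t) t (PySem.List.pySetD (PySem.List.pyGetD (pvSM n t) t []) 0 t)) 0
          (PySem.List.pySetD (PySem.List.pyGetD (PySem.List.pySetD (pvSM n t) t (PySem.List.pySetD (PySem.List.pyGetD (pvSM n t) t []) 0 t)) 0 []) t t)
      from rfl]
  rw [hm1]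
  -- second assignment m[0][t] = t is a no-op on pvSM n (t+1)
  have hget0 : PySem.List.pyGetD (pvSM n (t + 1)) 0 [] = pvRow n (t + 1) 0 := by
    unfold pvSM
    exact PySem.List.pyGetD_map_pyRange_of_nonneg _ _ _ _ le_rfl hn
  rw [hget0, pvRow_zero_eq, PySem.List.pySetD_of_nonneg (h := h0), set_self_range n t h0 h,
    PySem.List.pySetD_of_nonneg (h := le_rfl)]
  simp only [Int.toNat_zero]
  unfold pvSM
  rw [PySem.List.pyRange_one_cons hn, List.map_cons, List.set_cons_zero, pvRow_zero_eq,
    ← PySem.List.pyRange_one_cons hn]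

theorem pvLoop (n : Int) (k : Nat) : ∀ t : Int, 0 ≤ t → (n - t).toNat = k →
    (PySem.List.pyRange t n 1).foldl pvStep (pvSM n t) = pvSM n n := by
  induction k with
  | zero =>
    intro t h0 hk
    have hle : n ≤ t := by omega
    rw [PySem.List.pyRange_one_eq_nil hle, List.foldl_nil]
    unfold pvSM
    apply List.map_congr_left
    intro i hi
    have := (PySem.List.mem_pyRange_one).mp hi
    apply pvRow_congr
    constructor <;> intro <;> omega
  | succ k ih =>
    intro t h0 hk
    have hlt : t < n := by omega
    rw [PySem.List.pyRange_one_cons hlt, List.foldl_cons, pvStep_eq n t h0 hlt]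
    exact ih (t + 1) (by omega) (by omega)

theorem pvInit (n : Int) :
    (PySem.List.pyRange 0 n 1).foldl
      (fun m _i => m ++ [(PySem.List.pyRange 0 n 1).map (fun i => i)]) ([] : List (List Int))
    = pvSM n 0 := by
  rw [PySem.List.foldl_append_singleton_eq_map]
  unfold pvSM
  simp only [List.nil_append]
  apply List.map_congr_left
  intro i hi
  have hi' := (PySem.List.mem_pyRange_one).mp hi
  unfold pvRow
  apply List.map_congr_left
  intro j _
  have : ¬ (i < (0:Int)) := by omega
  simp [this]

theorem pvFinal (n : Int) : pvSM n n = get_mat_alt n := by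
  unfold pvSM get_mat_alt
  apply List.map_congr_left
  intro i hi
  have hi' := (PySem.List.mem_pyRange_one).mp hi
  unfold pvRow
  apply List.map_congr_left
  intro j _
  have : i < n := hi'.2
  simp [this]

-- ===== VERDICT (by name: the statement is the Claim_ definition above) =====
theorem get_mat_spec : Claim_equal_get_mat := by
  intro n _
  unfold Spec_get_mat get_mat
  rw [show (fun (m : List (List Int)) (i : Int) =>
      PySem.List.pySetD (PySem.List.pySetD m i (PySem.List.pySetD (PySem.List.pyGetD m i []) 0 i)) 0
        (PySem.List.pySetD (PySem.List.pyGetD (PySem.List.pySetD m i (PySem.List.pySetD (PySem.List.pyGetD m i []) 0 i)) 0 []) i i))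
      = pvStep from rfl]
  rw [pvInit, pvLoop n (n - 0).toNat 0 le_rfl rfl, pvFinal]
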